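-- pv_equiv track=rewrite | github.com/last-26/SMTbot | src/strategy/ha_history_backfill.py | _compute_streak_sequence
-- ===== SOURCE A (Python) =====
-- def _compute_streak_sequence(colors: list[str]) -> list[int]:
--     """Pine `f_ha_streak_tf` recursion: signed running counter."""
--     streaks: list[int] = []
--     s = 0
--     for c in colors:
--         if c == "DOJI":
--             s = 0
--         elif c == "GREEN":
--             s = s + 1 if s >= 0 else 1
--         else:  # RED
--             s = s - 1 if s <= 0 else -1
--         streaks.append(s)
--     return streaks
-- ===== SOURCE B (Python) =====
-- def _key(c):
--     return 0 if c == "DOJI" else (1 if c == "GREEN" else -1)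
--
-- def _compute_streak_sequence(colors: list[str]) -> list[int]:
--     out: list[int] = []
--     i, n = 0, len(colors)
--     while i < n:
--         k = _key(colors[i])
--         j = i + 1
--         while j < n and _key(colors[j]) == k:
--             j += 1
--         run = j - i
--         if k == 1:
--             out.extend(range(1, run + 1))
--         elif k == -1:
--             out.extend(range(-1, -run - 1, -1))
--         else:
--             out.extend([0] * run)
--         i = j
--     return out
-- ===== Notes on version B (the rewrite author's own statement) =====
-- stated objective: alternative
-- what changed: B replaces A's element-by-element signed accumulator with a run-length decomposition: it groups maximal runs of equal direction key (DOJI/GREEN/other) and emits each run's block at once via range(1,n+1), range(-1,-n-1,-1) or [0]*n.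
import Mathlib
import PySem

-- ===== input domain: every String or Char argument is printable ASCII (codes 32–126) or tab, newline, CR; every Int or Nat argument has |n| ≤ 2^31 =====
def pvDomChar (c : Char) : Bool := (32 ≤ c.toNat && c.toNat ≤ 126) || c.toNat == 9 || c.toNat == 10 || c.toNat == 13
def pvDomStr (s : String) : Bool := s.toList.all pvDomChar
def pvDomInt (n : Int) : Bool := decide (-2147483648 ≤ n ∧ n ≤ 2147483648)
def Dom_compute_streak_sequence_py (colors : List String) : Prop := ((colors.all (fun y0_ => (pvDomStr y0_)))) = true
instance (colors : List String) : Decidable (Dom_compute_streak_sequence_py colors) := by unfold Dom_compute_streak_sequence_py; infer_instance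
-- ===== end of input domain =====

-- B replaces the element-wise accumulator recursion by a run-length decomposition:
-- group maximal runs of equal direction (DOJI=0 / GREEN=+1 / other=-1) and emit each
-- run's signed counter block at once (objective: alternative decomposition, same cost).

-- ===== PORT A =====
-- literal transliteration of A's loop: state (s, streaks), append s after each step
def compute_streak_sequence_py (colors : List String) : List Int :=
  (colors.foldl (fun (st : Int × List Int) c =>
      let s' : Int :=
        if c == "DOJI" then 0
        else if c == "GREEN" then (if st.1 ≥ 0 then st.1 + 1 else 1)
        else (if st.1 ≤ 0 then st.1 - 1 else -1)
      (s', st.2 ++ [s'])) ((0 : Int), ([] : List Int))).2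

-- ===== PORT B =====
-- direction key, as in Source B's _key
def pvKey (c : String) : Int :=
  if c == "DOJI" then 0 else if c == "GREEN" then 1 else -1

-- Source B's outer while loop: peel one maximal run (the inner while = takeWhile/dropWhile
-- on the key), emit its block via range, recurse on the remainder
def compute_streak_sequence_py_alt (colors : List String) : List Int :=
  match colors with
  | [] => []
  | c :: rest =>
    let k := pvKey c
    let run : Int := 1 + (rest.takeWhile (fun x => pvKey x == k)).length
    (if k = 1 then PySem.List.pyRange 1 (run + 1) 1
     else if k = -1 then PySem.List.pyRange (-1) (-run - 1) (-1)
     else List.replicate run.toNat 0)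
      ++ compute_streak_sequence_py_alt (rest.dropWhile (fun x => pvKey x == k))
  termination_by colors.length
  decreasing_by
    have := List.length_dropWhile_le (fun x => pvKey x == pvKey c) rest
    simp; omega

-- ===== PRECONDITION & SPEC =====
def Spec_compute_streak_sequence_py (colors : List String) (out : List Int) : Prop := out = compute_streak_sequence_py_alt colors
instance (colors : List String) (out : List Int) : Decidable (Spec_compute_streak_sequence_py colors out) := by unfold Spec_compute_streak_sequence_py; infer_instance

-- ===== CLAIM (what is proved, stated in full; the proofs are below) =====
def Claim_equal_compute_streak_sequence_py : Prop := ∀ (colors : List String), Dom_compute_streak_sequence_py colors → Spec_compute_streak_sequence_py colors (compute_streak_sequence_py colors)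

-- ===== LEMMAS AND PROOFS =====

-- A's per-element state transition
def pvStep (s : Int) (c : String) : Int :=
  if c == "DOJI" then 0
  else if c == "GREEN" then (if s ≥ 0 then s + 1 else 1)
  else (if s ≤ 0 then s - 1 else -1)

-- A's loop as a plain recursion (emitted list only)
def pvGoA : Int → List String → List Int
  | _, [] => []
  | s, c :: cs => pvStep s c :: pvGoA (pvStep s c) cs

theorem pvFoldl_eq (cs : List String) : ∀ (s : Int) (acc : List Int),
    (cs.foldl (fun (st : Int × List Int) c =>
      let s' : Int :=
        if c == "DOJI" then 0
        else if c == "GREEN" then (if st.1 ≥ 0 then st.1 + 1 else 1)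
        else (if st.1 ≤ 0 then st.1 - 1 else -1)
      (s', st.2 ++ [s'])) (s, acc)).2 = acc ++ pvGoA s cs := by
  induction cs with
  | nil => intro s acc; simp [pvGoA]
  | cons c cs ih => intro s acc; simp only [List.foldl_cons, pvGoA, ih]; simp [pvStep]

theorem pvKey_cases (c : String) : pvKey c = 0 ∨ pvKey c = 1 ∨ pvKey c = -1 := by
  unfold pvKey; split_ifs <;> simp

theorem pvStep_key0 (s : Int) (c : String) (h : pvKey c = 0) : pvStep s c = 0 := by
  unfold pvKey at h; unfold pvStep; split_ifs at * <;> omega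

theorem pvStep_key1 (s : Int) (c : String) (h : pvKey c = 1) :
    pvStep s c = if s ≥ 0 then s + 1 else 1 := by
  unfold pvKey at h; unfold pvStep; split_ifs at * <;> omega

theorem pvStep_keyneg (s : Int) (c : String) (h : pvKey c = -1) :
    pvStep s c = if s ≤ 0 then s - 1 else -1 := by
  unfold pvKey at h; unfold pvStep; split_ifs at * <;> omega

theorem pvGreenRun (cs : List String) : ∀ (rest : List String) (s : Int), 0 ≤ s →
    (∀ c ∈ cs, pvKey c = 1) →
    pvGoA s (cs ++ rest) =
      PySem.List.pyRange (s + 1) (s + 1 + cs.length) 1 ++ pvGoA (s + cs.length) rest := by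
  induction cs with
  | nil =>
    intro rest s _ _
    simp only [List.nil_append, List.length_nil, Nat.cast_zero, add_zero]
    rw [PySem.List.pyRange_one_eq_nil le_rfl]
    rfl
  | cons c cs ih =>
    intro rest s hs hall
    have hk : pvKey c = 1 := hall c (by simp)
    have hstep : pvStep s c = s + 1 := by rw [pvStep_key1 s c hk]; simp [hs]
    have hlt : s + 1 < s + 1 + ((c :: cs).length : Int) := by
      simp only [List.length_cons]; push_cast; omega
    rw [PySem.List.pyRange_one_cons hlt]
    simp only [List.cons_append, pvGoA, hstep]
    rw [ih rest (s + 1) (by omega) (fun x hx => hall x (by simp [hx]))]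
    simp only [List.length_cons]
    push_cast
    ring_nf

theorem pvRedRun (cs : List String) : ∀ (rest : List String) (s : Int), s ≤ 0 →
    (∀ c ∈ cs, pvKey c = -1) →
    pvGoA s (cs ++ rest) =
      PySem.List.pyRange (s - 1) (s - 1 - cs.length) (-1) ++ pvGoA (s - cs.length) rest := by
  induction cs with
  | nil =>
    intro rest s _ _
    simp only [List.nil_append, List.length_nil, Nat.cast_zero, sub_zero]
    rw [PySem.List.pyRange_neg_one_eq_nil le_rfl]
    rfl
  | cons c cs ih =>
    intro rest s hs hall
    have hk : pvKey c = -1 := hall c (by simp)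
    have hstep : pvStep s c = s - 1 := by rw [pvStep_keyneg s c hk]; simp [hs]
    have hlt : s - 1 - ((c :: cs).length : Int) < s - 1 := by
      simp only [List.length_cons]; push_cast; omega
    rw [PySem.List.pyRange_neg_one_cons hlt]
    simp only [List.cons_append, pvGoA, hstep]
    rw [ih rest (s - 1) (by omega) (fun x hx => hall x (by simp [hx]))]
    simp only [List.length_cons]
    push_cast
    ring_nf

theorem pvDojiRun (cs : List String) : ∀ (rest : List String),
    (∀ c ∈ cs, pvKey c = 0) →
    pvGoA 0 (cs ++ rest) = List.replicate cs.length 0 ++ pvGoA 0 rest := by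
  induction cs with
  | nil => intro rest _; simp
  | cons c cs ih =>
    intro rest hall
    have hstep : pvStep 0 c = 0 := pvStep_key0 0 c (hall c (by simp))
    simp only [List.cons_append, pvGoA, hstep, List.length_cons, List.replicate_succ]
    rw [ih rest (fun x hx => hall x (by simp [hx]))]

-- after a finished run, the state's exact value no longer matters: the next element
-- has a different key, and pvStep agrees from s and from 0 given matching sign
theorem pvGoA_state_green (d : List String) (n : Int) (hn : 1 ≤ n)
    (hd : ∀ c', d.head? = some c' → pvKey c' ≠ 1) : pvGoA n d = pvGoA 0 d := by
  cases d with
  | nil => rfl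
  | cons c' d' =>
    have hk : pvKey c' ≠ 1 := hd c' rfl
    have : pvStep n c' = pvStep 0 c' := by
      rcases pvKey_cases c' with h | h | h
      · rw [pvStep_key0 _ _ h, pvStep_key0 _ _ h]
      · exact absurd h hk
      · rw [pvStep_keyneg _ _ h, pvStep_keyneg _ _ h]
        simp only [if_neg (by omega : ¬ n ≤ 0), if_pos (by omega : (0:Int) ≤ 0)]
        norm_num
    simp only [pvGoA, this]

theorem pvGoA_state_red (d : List String) (n : Int) (hn : n ≤ -1)
    (hd : ∀ c', d.head? = some c' → pvKey c' ≠ -1) : pvGoA n d = pvGoA 0 d := by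
  cases d with
  | nil => rfl
  | cons c' d' =>
    have hk : pvKey c' ≠ -1 := hd c' rfl
    have : pvStep n c' = pvStep 0 c' := by
      rcases pvKey_cases c' with h | h | h
      · rw [pvStep_key0 _ _ h, pvStep_key0 _ _ h]
      · rw [pvStep_key1 _ _ h, pvStep_key1 _ _ h]
        simp only [if_neg (by omega : ¬ n ≥ 0), if_pos (by omega : (0:Int) ≥ 0)]
        norm_num
      · exact absurd h hk
    simp only [pvGoA, this]

theorem pvDropWhile_head_false {α : Type} (p : α → Bool) (l : List α) (y : α) (ys : List α)
    (h : l.dropWhile p = y :: ys) : p y = false := by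
  induction l with
  | nil => simp at h
  | cons a l ih =>
    rw [List.dropWhile_cons] at h
    by_cases hp : p a
    · rw [if_pos hp] at h; exact ih h
    · rw [if_neg hp] at h
      simp only [List.cons.injEq] at h
      rw [← h.1]
      simpa using hp

theorem pvMainStep (c : String) (t d : List String)
    (hallt : ∀ x ∈ t, pvKey x = pvKey c)
    (hdhead : ∀ c', d.head? = some c' → pvKey c' ≠ pvKey c) :
    pvGoA 0 (c :: (t ++ d)) =
      (if pvKey c = 1 then PySem.List.pyRange 1 ((1 + (t.length : Int)) + 1) 1
       else if pvKey c = -1 then PySem.List.pyRange (-1) (-(1 + (t.length : Int)) - 1) (-1)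
       else List.replicate (1 + (t.length : Int)).toNat 0) ++ pvGoA 0 d := by
  have hrw : c :: (t ++ d) = (c :: t) ++ d := rfl
  rcases pvKey_cases c with h0 | h1 | hneg
  · -- DOJI run
    rw [h0] at hallt hdhead ⊢
    norm_num
    rw [hrw, pvDojiRun (c :: t) d (by
        intro x hx; rcases List.mem_cons.mp hx with h | h
        · subst h; exact h0
        · exact hallt x h)]
    congr 1
    congr 1
    simp only [List.length_cons]
    omega
  · -- GREEN run
    rw [h1] at hallt hdhead ⊢
    norm_num
    rw [hrw, pvGreenRun (c :: t) d 0 le_rfl (by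
        intro x hx; rcases List.mem_cons.mp hx with h | h
        · subst h; exact h1
        · exact hallt x h)]
    rw [pvGoA_state_green d (0 + ((c :: t).length : Int))
        (by simp only [List.length_cons]; push_cast; omega) hdhead]
    congr 2
  · -- RED run
    rw [hneg] at hallt hdhead ⊢
    norm_num
    rw [hrw, pvRedRun (c :: t) d 0 le_rfl (by
        intro x hx; rcases List.mem_cons.mp hx with h | h
        · subst h; exact hneg
        · exact hallt x h)]
    rw [pvGoA_state_red d (0 - ((c :: t).length : Int))
        (by simp only [List.length_cons]; push_cast; omega) hdhead]
    congr 2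
    simp only [List.length_cons]
    push_cast
    ring

theorem pvMain : ∀ (n : Nat) (colors : List String), colors.length ≤ n →
    pvGoA 0 colors = compute_streak_sequence_py_alt colors := by
  intro n
  induction n with
  | zero =>
    intro colors h
    have : colors = [] := List.eq_nil_of_length_eq_zero (Nat.le_zero.mp h)
    subst this
    simp [compute_streak_sequence_py_alt, pvGoA]
  | succ n ih =>
    intro colors hlen
    cases colors with
    | nil => simp [compute_streak_sequence_py_alt, pvGoA]
    | cons c rest =>
      have hsplit : rest = rest.takeWhile (fun x => pvKey x == pvKey c)
          ++ rest.dropWhile (fun x => pvKey x == pvKey c) :=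
        (List.takeWhile_append_dropWhile).symm
      have hallt : ∀ x ∈ rest.takeWhile (fun x => pvKey x == pvKey c), pvKey x = pvKey c := by
        intro x hx
        have := List.mem_takeWhile_imp hx
        simpa using this
      have hdhead : ∀ c', (rest.dropWhile (fun x => pvKey x == pvKey c)).head? = some c' →
          pvKey c' ≠ pvKey c := by
        intro c' hc'
        cases hdd : rest.dropWhile (fun x => pvKey x == pvKey c) with
        | nil => rw [hdd] at hc'; simp at hc'
        | cons y ys =>
          have hnp := pvDropWhile_head_false _ _ _ _ hdd
          rw [hdd] at hc'
          simp only [List.head?_cons, Option.some.injEq] at hc'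
          subst hc'
          simpa using hnp
      have hdlen : (rest.dropWhile (fun x => pvKey x == pvKey c)).length ≤ n := by
        have h1 := List.length_dropWhile_le (fun x => pvKey x == pvKey c) rest
        simp only [List.length_cons] at hlen
        omega
      rw [compute_streak_sequence_py_alt]
      rw [show (c :: rest) = c :: (rest.takeWhile (fun x => pvKey x == pvKey c)
          ++ rest.dropWhile (fun x => pvKey x == pvKey c)) from by rw [← hsplit]]
      rw [pvMainStep c _ _ hallt hdhead, ih _ hdlen]

-- ===== VERDICT (by name: the statement is the Claim_ definition above) =====
theorem compute_streak_sequence_py_spec : Claim_equal_compute_streak_sequence_py := by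
  intro colors _
  unfold Spec_compute_streak_sequence_py compute_streak_sequence_py
  rw [pvFoldl_eq]
  simpa using pvMain colors.length colors le_rfl
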